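-- pv_equiv track=rewrite | github.com/dev-hang/Programmers-Algorithm | level2/taking_group_photo.py | taking_group_photo
-- ===== SOURCE A (Python) =====
-- from itertools import permutations
--
-- def taking_group_photo(n, data):
--     answer = 0
--     friends = ['A', 'C', 'F', 'J', 'M', 'N', 'R', 'T']
--
--     for p in permutations(friends):
--         is_correct = True
--         for cond in data:
--             a, b, sign, val = cond[0], cond[2], cond[3], int(cond[4])
--             diff = abs(p.index(a) - p.index(b)) - 1
--             if (sign == '=' and diff != val) or (sign == '<' and diff >= val) or (sign == '>' and diff <= val):
--                 is_correct = False
--                 break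
--
--         if is_correct:
--             answer += 1
--
--     return answer
-- ===== SOURCE B (Python) =====
-- def taking_group_photo(n, data):
--     friends = ['A', 'C', 'F', 'J', 'M', 'N', 'R', 'T']
--     conds = [(c[0], c[2], c[3], int(c[4])) for c in data]
--
--     def place(prefix, remaining):
--         if not remaining:
--             return 1
--         total = 0
--         for i in range(len(remaining)):
--             new = prefix + [remaining[i]]
--             ok = True
--             for a, b, sign, val in conds:
--                 if a in new and b in new:
--                     diff = abs(new.index(a) - new.index(b)) - 1
--                     if (sign == '=' and diff != val) or (sign == '<' and diff >= val) or (sign == '>' and diff <= val):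
--                         ok = False
--                         break
--             if ok:
--                 total += place(new, remaining[:i] + remaining[i+1:])
--         return total
--
--     return place([], friends)
-- ===== Notes on version B (the rewrite author's own statement) =====
-- stated objective: alternative
-- what changed: B replaces A's exhaustive scan of all 40320 permutations by a recursive backtracking search: conditions are parsed once up front, friends are placed seat by seat, and a branch is pruned as soon as any condition with both endpoints already seated is violated (sound because a seated friend's index never changes in an extension), counting 1 at each completed assignment.
-- outside the precondition, e.g. on taking_group_photo(8, ['A~A=1', 'Z']): A returns 0, B raises IndexError
import Mathlib
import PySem

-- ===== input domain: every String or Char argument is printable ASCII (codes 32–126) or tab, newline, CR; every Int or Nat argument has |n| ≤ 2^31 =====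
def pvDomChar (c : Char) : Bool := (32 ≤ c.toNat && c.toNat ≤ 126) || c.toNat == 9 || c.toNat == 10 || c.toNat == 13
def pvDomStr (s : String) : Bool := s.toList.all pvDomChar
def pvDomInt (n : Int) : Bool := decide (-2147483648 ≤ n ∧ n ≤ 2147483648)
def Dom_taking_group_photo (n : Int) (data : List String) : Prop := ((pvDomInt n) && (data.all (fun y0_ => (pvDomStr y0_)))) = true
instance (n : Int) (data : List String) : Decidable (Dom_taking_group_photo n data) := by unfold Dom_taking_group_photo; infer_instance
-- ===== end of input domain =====

-- B replaces A's scan of all 40320 permutations by recursive backtracking: it parses the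
-- conditions once, places friends seat by seat, and prunes a branch as soon as a condition
-- with both endpoints already seated is violated (alternative decomposition; not timed faster).

-- ===== PORT A =====
def pvFriendsA : List Char := ['A', 'C', 'F', 'J', 'M', 'N', 'R', 'T']

-- inner 'for cond in data' loop with its break-on-violation and the is_correct flag
def pvCheckA (p : List Char) : List String → Bool
  | [] => true
  | cond :: rest =>
    let a := (PySem.Str.pyGet? cond 0).getD ' '
    let b := (PySem.Str.pyGet? cond 2).getD ' '
    let sign := (PySem.Str.pyGet? cond 3).getD ' '
    let val := (PySem.Int.ofStr? (String.ofList [(PySem.Str.pyGet? cond 4).getD ' '])).getD 0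
    let diff : Int := |((PySem.List.index? p a).getD 0 : Int) - ((PySem.List.index? p b).getD 0 : Int)| - 1
    if (sign == '=' && !(diff == val)) || (sign == '<' && decide (diff ≥ val)) || (sign == '>' && decide (diff ≤ val)) then
      false
    else
      pvCheckA p rest

def taking_group_photo (n : Int) (data : List String) : Int :=
  (PySem.List.permutations pvFriendsA 8).foldl
    (fun answer p => if pvCheckA p data then answer + 1 else answer) 0

-- ===== PORT B =====
def pvFriendsB : List Char := ['A', 'C', 'F', 'J', 'M', 'N', 'R', 'T']

-- (c[0], c[2], c[3], int(c[4])) — parsed once, before the search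
def pvParse (cond : String) : Char × Char × Char × Int :=
  ((PySem.Str.pyGet? cond 0).getD ' ', (PySem.Str.pyGet? cond 2).getD ' ',
   (PySem.Str.pyGet? cond 3).getD ' ',
   (PySem.Int.ofStr? (String.ofList [(PySem.Str.pyGet? cond 4).getD ' '])).getD 0)

-- 'for a, b, sign, val in conds' with break: skip a condition unless both endpoints are seated
def pvCheckB (new : List Char) : List (Char × Char × Char × Int) → Bool
  | [] => true
  | (a, b, sign, val) :: rest =>
    if a ∈ new ∧ b ∈ new then
      let diff : Int := |((PySem.List.index? new a).getD 0 : Int) - ((PySem.List.index? new b).getD 0 : Int)| - 1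
      if (sign == '=' && !(diff == val)) || (sign == '<' && decide (diff ≥ val)) || (sign == '>' && decide (diff ≤ val)) then
        false
      else pvCheckB new rest
    else pvCheckB new rest

-- place(prefix, remaining); the Nat fuel only realises the recursion (remaining shrinks
-- by one per level, so fuel 8 at the top is never exhausted)
def pvPlace (conds : List (Char × Char × Char × Int)) : Nat → List Char → List Char → Int
  | _, _, [] => 1
  | 0, _, _ => 1
  | fuel + 1, pre, remaining =>
    (List.range remaining.length).foldl
      (fun total i =>
        let new := pre ++ [remaining.getD i ' ']
        if pvCheckB new conds then total + pvPlace conds fuel new (remaining.eraseIdx i) else total)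
      0

def taking_group_photo_alt (n : Int) (data : List String) : Int :=
  pvPlace (data.map pvParse) 8 [] pvFriendsB

-- ===== PRECONDITION & SPEC =====
-- Pre_ excludes exactly the data on which A raises: a condition string shorter than 5
-- characters (IndexError), an endpoint letter not among the eight friends (ValueError from
-- list.index), or a non-digit distance character (ValueError from int). (Because B parses
-- all conditions up front while A stops at the first violated one, A can still RETURN on
-- some such inputs — see the cite in claim.json.)
def Pre_taking_group_photo (n : Int) (data : List String) : Prop :=
  ∀ cond ∈ data,
    5 ≤ cond.toList.length ∧
    (PySem.Str.pyGet? cond 0).getD ' ' ∈ pvFriendsA ∧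
    (PySem.Str.pyGet? cond 2).getD ' ' ∈ pvFriendsA ∧
    ('0' ≤ (PySem.Str.pyGet? cond 4).getD ' ' ∧ (PySem.Str.pyGet? cond 4).getD ' ' ≤ '9')

instance (n : Int) (data : List String) : Decidable (Pre_taking_group_photo n data) := by
  unfold Pre_taking_group_photo; infer_instance

def pvWitness_taking_group_photo : Int × List String := (2, ["N~F=0", "R~T>2"])

def Spec_taking_group_photo (n : Int) (data : List String) (out : Int) : Prop := out = taking_group_photo_alt n data
instance (n : Int) (data : List String) (out : Int) : Decidable (Spec_taking_group_photo n data out) := by unfold Spec_taking_group_photo; infer_instance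

-- ===== CLAIM (what is proved, stated in full; the proofs are below) =====
def Claim_equal_taking_group_photo : Prop := ∀ (n : Int) (data : List String), Dom_taking_group_photo n data → Pre_taking_group_photo n data → Spec_taking_group_photo n data (taking_group_photo n data)

-- ===== LEMMAS AND PROOFS =====

-- the violation test of one parsed condition c = (a, b, sign, val) against a seating p
def pvViol (p : List Char) (c : Char × Char × Char × Int) : Bool :=
  let diff : Int := |((PySem.List.index? p c.1).getD 0 : Int) - ((PySem.List.index? p c.2.1).getD 0 : Int)| - 1
  (c.2.2.1 == '=' && !(diff == c.2.2.2)) || (c.2.2.1 == '<' && decide (diff ≥ c.2.2.2))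
    || (c.2.2.1 == '>' && decide (diff ≤ c.2.2.2))

theorem pvIfFalseAnd (C R : Bool) : (if C then false else R) = (!C && R) := by
  cases C <;> simp

-- A's loop-with-break is 'no parsed condition is violated'
theorem pvCheckA_eq_all (p : List Char) (data : List String) :
    pvCheckA p data = (data.map pvParse).all (fun c => !pvViol p c) := by
  induction data with
  | nil => rfl
  | cons cond rest ih =>
    simp only [pvCheckA, List.map_cons, List.all_cons, ih, pvIfFalseAnd, pvViol, pvParse]

-- B's loop-with-break is 'no condition with both endpoints seated is violated'
theorem pvCheckB_eq_all (new : List Char) (conds : List (Char × Char × Char × Int)) :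
    pvCheckB new conds
      = conds.all (fun c => !(decide (c.1 ∈ new ∧ c.2.1 ∈ new) && pvViol new c)) := by
  induction conds with
  | nil => rfl
  | cons c rest ih =>
    obtain ⟨a, b, sign, val⟩ := c
    simp only [List.all_cons, ← ih]
    show (if a ∈ new ∧ b ∈ new then (if _ then false else pvCheckB new rest) else pvCheckB new rest) = _
    by_cases h : a ∈ new ∧ b ∈ new
    · rw [if_pos h, pvIfFalseAnd]
      simp [h, pvViol]
    · rw [if_neg h]
      simp [h]

-- a seated friend's index never changes when the seating is extended
theorem pvViol_append (new t : List Char) (c : Char × Char × Char × Int)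
    (ha : c.1 ∈ new) (hb : c.2.1 ∈ new) : pvViol (new ++ t) c = pvViol new c := by
  unfold pvViol
  rw [PySem.List.index?_append_of_mem t ha, PySem.List.index?_append_of_mem t hb]

theorem pvCountP_flatMap {α β : Type} (l : List α) (f : α → List β) (p : β → Bool) :
    (l.flatMap f).countP p = (l.map (fun i => (f i).countP p)).sum := by
  induction l with
  | nil => rfl
  | cons x t ih => simp [List.flatMap_cons, List.countP_append, ih]

theorem pvFoldlIfSum (l : List Nat) (c : Nat → Bool) (g : Nat → Int) :
    l.foldl (fun t i => if c i then t + g i else t) 0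
      = (l.map (fun i => if c i then g i else 0)).sum := by
  have he : (fun (t : Int) i => if c i then t + g i else t)
      = fun t i => t + (if c i then g i else 0) := by
    funext t i; by_cases h : c i <;> simp [h]
  rw [he, PySem.List.foldl_add l (fun i => if c i = true then g i else 0) 0, zero_add]

theorem pvPlace_succ (conds : List (Char × Char × Char × Int)) (fuel : Nat)
    (pre r : List Char) (h : r ≠ []) :
    pvPlace conds (fuel + 1) pre r
      = (List.range r.length).foldl
          (fun total i =>
            let new := pre ++ [r.getD i ' ']
            if pvCheckB new conds then total + pvPlace conds fuel new (r.eraseIdx i) else total)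
          0 := by
  cases r with
  | nil => exact absurd rfl h
  | cons y t => rfl

theorem pvPerms_succ {α : Type} (xs : List α) (k : Nat) :
    PySem.List.permutations xs (k + 1)
      = (List.range xs.length).flatMap
          (fun i => match xs[i]? with
            | none => []
            | some x => (PySem.List.permutations (xs.eraseIdx i) k).map (x :: ·)) := rfl

-- the backtracking count below a node equals the number of full orderings of the remaining
-- friends whose concatenation with the prefix violates no parsed condition
theorem pvMain (conds : List (Char × Char × Char × Int)) :
    ∀ (fuel : Nat) (pre remaining : List Char),
      remaining.length = fuel →
      (∀ c ∈ conds, c.1 ∈ pre ++ remaining ∧ c.2.1 ∈ pre ++ remaining) →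
      pvCheckB pre conds = true →
      pvPlace conds fuel pre remaining
        = ((PySem.List.permutations remaining fuel).countP
            (fun r => conds.all (fun c => !pvViol (pre ++ r) c)) : Int) := by
  intro fuel
  induction fuel with
  | zero =>
    intro pre remaining hlen hmem hpre
    obtain rfl : remaining = [] := List.length_eq_zero_iff.mp hlen
    have hall : conds.all (fun c => !pvViol (pre ++ []) c) = true := by
      rw [List.all_eq_true]
      intro c hc
      have h1 := (List.all_eq_true.mp ((pvCheckB_eq_all pre conds) ▸ hpre)) c hc
      have hm := hmem c hc
      simp only [List.append_nil] at hm ⊢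
      simpa [hm.1, hm.2] using h1
    show (1 : Int) = _
    have h2 : PySem.List.permutations ([] : List Char) 0 = [[]] := rfl
    rw [h2, List.countP_cons, List.countP_nil, hall]
    rfl
  | succ k ih =>
    intro pre remaining hlen hmem hpre
    have hne : remaining ≠ [] := by
      intro h; rw [h] at hlen; exact Nat.succ_ne_zero k hlen.symm
    rw [pvPlace_succ conds k pre remaining hne, pvPerms_succ remaining k,
        pvFoldlIfSum, pvCountP_flatMap, Nat.cast_list_sum, List.map_map]
    congr 1
    apply List.map_congr_left
    intro i hi
    have hi' : i < remaining.length := List.mem_range.mp hi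
    have hgd : remaining.getD i ' ' = remaining[i] := List.getD_eq_getElem remaining ' ' hi'
    simp only [Function.comp_apply, List.getElem?_eq_getElem hi', hgd]
    rw [List.countP_map]
    have hperm : (pre ++ remaining).Perm ((pre ++ [remaining[i]]) ++ remaining.eraseIdx i) := by
      rw [List.append_assoc]
      exact List.Perm.append_left pre (List.getElem_cons_eraseIdx_perm hi').symm
    by_cases h : pvCheckB (pre ++ [remaining[i]]) conds = true
    · rw [if_pos h]
      rw [ih (pre ++ [remaining[i]]) (remaining.eraseIdx i)
            (by simp [List.length_eraseIdx_of_lt hi', hlen])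
            (fun c hc => ⟨hperm.mem_iff.mp (hmem c hc).1, hperm.mem_iff.mp (hmem c hc).2⟩) h]
      congr 1
      apply List.countP_congr
      intro r _
      simp only [Function.comp_apply]
      rw [show pre ++ remaining[i] :: r = pre ++ [remaining[i]] ++ r from by simp]
    · rw [if_neg h]
      symm
      rw [Int.natCast_eq_zero, List.countP_eq_zero]
      intro r _
      rw [Bool.not_eq_true] at h
      rw [pvCheckB_eq_all, List.all_eq_false] at h
      obtain ⟨c, hc, hcp⟩ := h
      simp only [Bool.not_eq_true, Bool.not_eq_false', Bool.and_eq_true, decide_eq_true_eq] at hcp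
      have hv' : pvViol (pre ++ remaining[i] :: r) c = true := by
        rw [show pre ++ remaining[i] :: r = pre ++ [remaining[i]] ++ r from by simp,
            pvViol_append _ _ _ hcp.1.1 hcp.1.2, hcp.2]
      simp only [Function.comp_apply]
      intro hall
      have := List.all_eq_true.mp hall c hc
      rw [hv'] at this
      simp at this

-- ===== VERDICT (by name: the statement is the Claim_ definition above) =====
theorem taking_group_photo_spec : Claim_equal_taking_group_photo := by
  intro n data _ hpre
  unfold Spec_taking_group_photo taking_group_photo taking_group_photo_alt
  rw [PySem.List.foldl_if_add_one (p := fun p => pvCheckA p data), zero_add]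
  rw [pvMain (data.map pvParse) 8 [] pvFriendsB rfl
        (by
          intro c hc
          obtain ⟨cond, hcond, rfl⟩ := List.mem_map.mp hc
          have h := hpre cond hcond
          exact ⟨h.2.1, h.2.2.1⟩)
        (by rw [pvCheckB_eq_all]; simp)]
  congr 1
  apply List.countP_congr
  intro p _
  rw [pvCheckA_eq_all p data]
  rfl
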